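-- pv_equiv track=rewrite | github.com/C0jae/Coding-Pratice | src/study/그리디/P09_무지의먹방라이브.py | solution
-- ===== SOURCE A (Python) =====
-- def solution(food_times, k):
--     # 음식을 먹을 때의 시간(초)
--     cnt = 0
--
--     # 음식순서(리스트 고려 0부터 시작 -> 결과값 도출시에는 i + 1번째 음식)
--     i = 0
--
--     # k초일때 먹을 순서
--     while cnt <= k:
--         # n번째 접시에 음식이 있을 경우 1초만큼 섭취 후 다음번호 음식으로 이동
--         if (food_times[i] != 0):
--             food_times[i] -= 1
--             i += 1
--             cnt += 1
--
--         # n번째 접시에 음식이 없을 경우 다음번호 음식으로 이동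
--         else:
--             i += 1
--
--         # 리스트 배열 고려 i가 food_times의 길이만큼 증가하였다면 0으로 재선언
--         if (i == len(food_times)):
--             i = 0
--
--     # 결과값 도출을 위해 i = 0이라면 len(food_times) 번째 음식
--     if (i == 0):
--         i = len(food_times)
--
--     return i
-- ===== SOURCE B (Python) =====
-- def solution(food_times, k):
--     ft = list(food_times)
--     while True:
--         active = [i for i, v in enumerate(ft) if v != 0]
--         if k < len(active):
--             return active[k] + 1
--         k -= len(active)
--         ft = [v - 1 if v != 0 else v for v in ft]
-- ===== Notes on version B (the rewrite author's own statement) =====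
-- stated objective: alternative
-- what changed: A walks the dishes one second at a time with a cyclic index, in-place mutation and a post-hoc renumbering of the result; B simulates one whole round per iteration over a fresh list: it collects the active dish indices once, answers by direct indexing when k falls inside the round, and otherwise subtracts the round length from k and decrements every active dish.
-- outside the precondition, e.g. on solution([2, 3], -2): A returns 2, B returns 1; on solution([0], -1): A returns 1, B raises IndexError
import Mathlib
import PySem

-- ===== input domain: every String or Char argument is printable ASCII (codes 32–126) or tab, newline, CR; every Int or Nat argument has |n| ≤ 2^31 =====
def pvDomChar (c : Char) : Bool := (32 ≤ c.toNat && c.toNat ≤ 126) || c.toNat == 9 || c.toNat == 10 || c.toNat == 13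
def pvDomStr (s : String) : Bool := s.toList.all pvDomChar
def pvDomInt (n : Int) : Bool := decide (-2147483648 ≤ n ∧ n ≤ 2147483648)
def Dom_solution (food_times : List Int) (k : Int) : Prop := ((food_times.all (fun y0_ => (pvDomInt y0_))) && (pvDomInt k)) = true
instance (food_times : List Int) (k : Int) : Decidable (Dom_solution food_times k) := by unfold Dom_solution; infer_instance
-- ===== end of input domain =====

-- B replaces A's one-second-at-a-time cyclic index walk (which mutates food_times in place; the
-- equivalence proved here is about the return value only) by a round-at-a-time simulation over a
-- fresh list: collect the active dish indices, answer inside the round or consume one whole round.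


-- ===== PORT A =====
-- 'if i == len(food_times): i = 0'
def wrapA (n j : Nat) : Nat := if j = n then 0 else j

-- the while-loop of A; fuel-governed (A's loop diverges outside Pre_solution); state (ft, i, cnt)
def solLoop : Nat → List Int → Nat → Int → Int → Nat
  | 0, _, i, _, _ => i
  | f+1, ft, i, cnt, k =>
    if cnt ≤ k then
      match PySem.List.pyGet? ft (i : Int) with
      | none => i   -- Python raises IndexError here (empty list); excluded by Pre_solution
      | some v =>
        if v ≠ 0 then solLoop f (ft.set i (v - 1)) (wrapA ft.length (i+1)) (cnt + 1) k
        else solLoop f ft (wrapA ft.length (i+1)) cnt k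
    else i

def solution (food_times : List Int) (k : Int) : Int :=
  let r := solLoop ((k.toNat + 2) * (food_times.length + 1)) food_times 0 0 k
  if r = 0 then (food_times.length : Int) else (r : Int)

-- ===== PORT B =====
-- '[i for i, v in enumerate(ft) if v != 0]' (i is the enumerate counter)
def actIdx : List Int → Nat → List Nat
  | [], _ => []
  | v :: rest, i => if v ≠ 0 then i :: actIdx rest (i+1) else actIdx rest (i+1)

-- '[v - 1 if v != 0 else v for v in ft]'
def decRound (ft : List Int) : List Int := ft.map (fun v => if v ≠ 0 then v - 1 else v)

-- the while-loop of B; fuel-governed (B's loop diverges outside Pre_solution)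
def solAltLoop : Nat → List Int → Int → Int
  | 0, _, _ => 0
  | f+1, ft, k =>
    let act := actIdx ft 0
    if k < (act.length : Int) then
      match PySem.List.pyGet? act k with
      | some i => (i : Int) + 1
      | none => 0   -- Python raises IndexError here; unreachable under Pre_solution
    else solAltLoop f (decRound ft) (k - act.length)

def solution_alt (food_times : List Int) (k : Int) : Int :=
  solAltLoop (k.toNat + 1) food_times k

-- ===== PRECONDITION & SPEC =====
-- Pre_solution excludes: k < 0, where A never runs its loop and its 'return len(food_times)' is an
-- accident of the final renumbering (B's value there is equally accidental); the empty list with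
-- k ≥ 0, where A raises IndexError; and inputs with no negative dish and k ≥ sum of the positive
-- amounts, where A's while loop diverges.  Negative amounts themselves are admitted.
def Pre_solution (food_times : List Int) (k : Int) : Prop :=
  food_times ≠ [] ∧ 0 ≤ k ∧
    ((∃ x ∈ food_times, x < 0) ∨ k < (food_times.filter (fun x => 0 < x)).sum)
instance (food_times : List Int) (k : Int) : Decidable (Pre_solution food_times k) := by
  unfold Pre_solution; infer_instance

def pvWitness_solution : List Int × Int := ([3, 1, 2], 4)

def Spec_solution (food_times : List Int) (k : Int) (out : Int) : Prop := out = solution_alt food_times k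
instance (food_times : List Int) (k : Int) (out : Int) : Decidable (Spec_solution food_times k out) := by unfold Spec_solution; infer_instance

-- ===== CLAIM (what is proved, stated in full; the proofs are below) =====
def Claim_equal_solution : Prop := ∀ (food_times : List Int) (k : Int), Dom_solution food_times k → Pre_solution food_times k → Spec_solution food_times k (solution food_times k)

-- ===== LEMMAS AND PROOFS =====

-- common round-based specification both loops are reduced to (e : 0-based index of the wanted bite)
def specF : Nat → List Int → Nat → Int
  | 0, _, _ => 0
  | f+1, ft, e =>
    let act := actIdx ft 0
    if e < act.length then ((act.getD e 0 : Nat) : Int) + 1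
    else specF f (decRound ft) (e - act.length)

-- the list after the walker has finished positions < i of the current round
def decFrom (ft : List Int) (i : Nat) : List Int := ft.take i ++ decRound (ft.drop i)

-- invariant guaranteeing the eating never runs dry
def Pinv (ft : List Int) (r : Int) : Prop :=
  (∃ x ∈ ft, x < 0) ∨ ((∀ x ∈ ft, 0 ≤ x) ∧ r < (ft.filter (fun x => 0 < x)).sum)


theorem actIdx_bounds : ∀ (l : List Int) (i : Nat), ∀ p ∈ actIdx l i, i ≤ p ∧ p < i + l.length := by
  intro l
  induction l with
  | nil => intro i p hp; simp [actIdx] at hp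
  | cons v rest ih =>
    intro i p hp
    simp only [actIdx] at hp
    by_cases hv : v ≠ 0
    · simp [hv] at hp
      rcases hp with h | h
      · subst h; simp
      · have := ih (i+1) p h; constructor <;> [omega; (simp only [List.length_cons]; omega)]
    · simp [hv] at hp
      have := ih (i+1) p hp; constructor <;> [omega; (simp only [List.length_cons]; omega)]

theorem actIdx_length : ∀ (l : List Int) (i : Nat), (actIdx l i).length = l.countP (fun v => decide (v ≠ 0)) := by
  intro l
  induction l with
  | nil => intro i; simp [actIdx]
  | cons v rest ih =>
    intro i
    by_cases hv : v ≠ 0 <;> simp [actIdx, hv, ih (i+1)]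

theorem actIdx_ne_nil : ∀ (l : List Int) (i : Nat), (∃ x ∈ l, x ≠ 0) → actIdx l i ≠ [] := by
  intro l
  induction l with
  | nil => intro i h; simp at h
  | cons v rest ih =>
    intro i h
    by_cases hv : v ≠ 0
    · simp [actIdx, hv]
    · simp only [ne_eq, not_not] at hv
      subst hv
      simp only [actIdx, ne_eq, not_true_eq_false, if_false]
      apply ih
      rcases h with ⟨x, hx, hxne⟩
      rcases hx with _ | hx
      · exact absurd rfl hxne
      · exact ⟨x, by assumption, hxne⟩

theorem decRound_length (ft : List Int) : (decRound ft).length = ft.length := by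
  simp [decRound]

theorem decFrom_zero (ft : List Int) : decFrom ft 0 = decRound ft := by
  simp [decFrom]

-- sum of positive amounts drops by exactly the number of active dishes, for nonnegative lists
theorem decRound_posSum (l : List Int) (h : ∀ x ∈ l, 0 ≤ x) :
    ((decRound l).filter (fun x => 0 < x)).sum
      = (l.filter (fun x => 0 < x)).sum - (l.countP (fun v => decide (v ≠ 0)) : Int) := by
  induction l with
  | nil => simp [decRound]
  | cons v rest ih =>
    have hv := h v (by simp)
    have hrest := ih (fun x hx => h x (by simp [hx]))
    by_cases h0 : v = 0
    · subst h0; simpa [decRound, List.countP_cons] using hrest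
    · have hvpos : 0 < v := lt_of_le_of_ne hv (Ne.symm h0)
      by_cases h1 : v = 1
      · subst h1
        simp [decRound] at hrest ⊢
        rw [hrest]; ring
      · have h2 : (1:Int) < v := by omega
        simp [decRound, h0, hvpos, h2] at hrest ⊢
        rw [hrest]; ring

theorem decRound_nonneg (l : List Int) (h : ∀ x ∈ l, 0 ≤ x) : ∀ x ∈ decRound l, 0 ≤ x := by
  intro x hx
  simp only [decRound, List.mem_map] at hx
  rcases hx with ⟨v, hv, rfl⟩
  have := h v hv
  split <;> omega

theorem Pinv_step (ft : List Int) (r : Int) (hP : Pinv ft r) :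
    Pinv (decRound ft) (r - (actIdx ft 0).length) := by
  rcases hP with ⟨x, hx, hneg⟩ | ⟨hnn, hsum⟩
  · left
    refine ⟨x - 1, ?_, by omega⟩
    simp only [decRound, List.mem_map]
    exact ⟨x, hx, by simp [show x ≠ 0 by omega]⟩
  · right
    refine ⟨decRound_nonneg ft hnn, ?_⟩
    rw [decRound_posSum ft hnn, actIdx_length ft 0]
    omega

theorem Pinv_act_ne_nil (ft : List Int) (r : Int) (hP : Pinv ft r) (hr : 0 ≤ r) :
    actIdx ft 0 ≠ [] := by
  apply actIdx_ne_nil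
  rcases hP with ⟨x, hx, hneg⟩ | ⟨hnn, hsum⟩
  · exact ⟨x, hx, by omega⟩
  · by_contra hall
    simp only [not_exists, not_and, ne_eq, not_not] at hall
    have : (ft.filter (fun x => 0 < x)) = [] := by
      apply List.filter_eq_nil_iff.mpr
      intro x hx
      simp only [decide_eq_true_eq, not_lt]
      have := hall x hx
      omega
    rw [this] at hsum
    simp only [List.sum_nil] at hsum
    omega

theorem set_take_append (ft : List Int) (i : Nat) (a : Int) (hi : i < ft.length) :
    (ft.set i a).take (i+1) = ft.take i ++ [a] := by
  rw [List.set_eq_take_cons_drop a hi, List.take_append]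
  have h1 : (ft.take i).length = i := by simp; omega
  rw [h1]
  simp

-- the walker's current list after eating once at position i (eat case of one loop iteration)
theorem decFrom_set_eat (ft : List Int) (i : Nat) (hi : i < ft.length) (hv : ft[i] ≠ 0) :
    decFrom (ft.set i (ft[i] - 1)) (i+1) = decFrom ft i := by
  have h2 : (ft.set i (ft[i] - 1)).drop (i+1) = ft.drop (i+1) := List.drop_set_of_lt (by omega)
  have h3 : decRound (ft.drop i) = (ft[i] - 1) :: decRound (ft.drop (i+1)) := by
    conv_lhs => rw [show ft.drop i = ft[i] :: ft.drop (i+1) from (List.getElem_cons_drop hi).symm]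
    simp only [decRound, List.map_cons]
    rw [if_pos hv]
  unfold decFrom
  rw [set_take_append ft i (ft[i] - 1) hi, h2, h3, List.append_assoc]
  rfl

theorem decFrom_skip (ft : List Int) (i : Nat) (hi : i < ft.length) (hv : ft[i] = 0) :
    decFrom ft (i+1) = decFrom ft i := by
  have h3 : decRound (ft.drop i) = ft[i] :: decRound (ft.drop (i+1)) := by
    conv_lhs => rw [show ft.drop i = ft[i] :: ft.drop (i+1) from (List.getElem_cons_drop hi).symm]
    simp only [decRound, List.map_cons]
    rw [if_neg (by simp [hv])]
  unfold decFrom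
  rw [List.take_succ_eq_append_getElem hi, h3, List.append_assoc]
  rfl

-- one full sweep of A's while loop over positions i, i+1, …, n-1 of the current round
theorem seg : ∀ (d : Nat) (f : Nat) (ft : List Int) (i : Nat) (cnt k : Int),
    i + d = ft.length → 0 < d → cnt ≤ k → d + 1 ≤ f →
    ((k - cnt < ((actIdx (ft.drop i) i).length : Int) →
        solLoop f ft i cnt k = wrapA ft.length ((actIdx (ft.drop i) i).getD (k - cnt).toNat 0 + 1))
     ∧ (((actIdx (ft.drop i) i).length : Int) ≤ k - cnt →
        solLoop f ft i cnt k
          = solLoop (f - d) (decFrom ft i) 0 (cnt + (actIdx (ft.drop i) i).length) k)) := by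
  intro d
  induction d with
  | zero => intro f ft i cnt k hlen hd; omega
  | succ d' ih =>
    intro f ft i cnt k hlen hd hcnt hf
    have hi : i < ft.length := by omega
    obtain ⟨f', rfl⟩ : ∃ f', f = f' + 1 := ⟨f - 1, by omega⟩
    have hget : PySem.List.pyGet? ft (i : Int) = some ft[i] := by
      rw [PySem.List.pyGet?_natCast]; exact List.getElem?_eq_getElem hi
    have hdrop : ft.drop i = ft[i] :: ft.drop (i+1) := (List.getElem_cons_drop hi).symm
    by_cases hv : ft[i] = 0
    · -- skip: the dish at i is empty
      have hact : actIdx (ft.drop i) i = actIdx (ft.drop (i+1)) (i+1) := by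
        rw [hdrop]; simp [actIdx, hv]
      have hstep : solLoop (f' + 1) ft i cnt k
          = solLoop f' ft (wrapA ft.length (i+1)) cnt k := by
        simp [solLoop, hcnt, hget, hv]
      rcases Nat.eq_zero_or_pos d' with hd0 | hd0
      · subst hd0
        have hin : i + 1 = ft.length := by omega
        have hnil : ft.drop (i+1) = [] := List.drop_of_length_le (by omega)
        have hact0 : actIdx (ft.drop i) i = [] := by rw [hact, hnil]; rfl
        constructor
        · intro hlt; rw [hact0] at hlt; simp at hlt; omega
        · intro _
          rw [hstep, hact0]
          have hw : wrapA ft.length (i+1) = 0 := by simp [wrapA, hin]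
          have hdf : decFrom ft i = ft := by
            rw [← decFrom_skip ft i hi hv]
            unfold decFrom
            rw [hnil, show ft.take (i+1) = ft from List.take_of_length_le (by omega)]
            simp [decRound]
          rw [hw, hdf]
          simp
      · have hih := ih f' ft (i+1) cnt k (by omega) hd0 hcnt (by omega)
        have hw : wrapA ft.length (i+1) = i + 1 := by simp [wrapA]; omega
        rw [hw] at hstep
        constructor
        · intro hlt
          rw [hact] at hlt ⊢
          rw [hstep, hih.1 hlt]
        · intro hle
          rw [hact] at hle ⊢
          rw [hstep, hih.2 hle, decFrom_skip ft i hi hv]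
          congr 1
          omega
    · -- eat: the dish at i is nonempty
      have hact : actIdx (ft.drop i) i = i :: actIdx (ft.drop (i+1)) (i+1) := by
        rw [hdrop]; simp [actIdx, hv]
      have hstep : solLoop (f' + 1) ft i cnt k
          = solLoop f' (ft.set i (ft[i] - 1)) (wrapA ft.length (i+1)) (cnt + 1) k := by
        simp [solLoop, hcnt, hget, hv]
      have hdropset : (ft.set i (ft[i] - 1)).drop (i+1) = ft.drop (i+1) :=
        List.drop_set_of_lt (by omega)
      rcases eq_or_lt_of_le hcnt with hck | hck
      · -- cnt = k: this bite is the answer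
        subst hck
        constructor
        · intro _
          obtain ⟨f'', rfl⟩ : ∃ f'', f' = f'' + 1 := ⟨f' - 1, by omega⟩
          rw [hstep, hact]
          have : solLoop (f'' + 1) (ft.set i (ft[i] - 1)) (wrapA ft.length (i+1)) (cnt + 1) cnt
              = wrapA ft.length (i+1) := by
            simp [solLoop, show ¬(cnt + 1 ≤ cnt) by omega]
          rw [this]
          simp
        · intro hle
          rw [hact] at hle
          simp at hle
          omega
      · -- cnt < k: keep walking
        rcases Nat.eq_zero_or_pos d' with hd0 | hd0
        · subst hd0
          have hin : i + 1 = ft.length := by omega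
          have hnil : ft.drop (i+1) = [] := List.drop_of_length_le (by omega)
          have hact1 : actIdx (ft.drop i) i = [i] := by rw [hact, hnil]; rfl
          constructor
          · intro hlt; rw [hact1] at hlt; simp at hlt; omega
          · intro _
            rw [hstep, hact1]
            have hw : wrapA ft.length (i+1) = 0 := by simp [wrapA, hin]
            have hdf : decFrom ft i = ft.set i (ft[i] - 1) := by
              rw [← decFrom_set_eat ft i hi hv]
              unfold decFrom
              rw [show (ft.set i (ft[i] - 1)).drop (i+1) = [] from hdropset.trans hnil,
                  show (ft.set i (ft[i] - 1)).take (i+1) = ft.set i (ft[i] - 1) from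
                    List.take_of_length_le (by simp; omega)]
              simp [decRound]
            rw [hw, hdf]
            simp
        · have hih := ih f' (ft.set i (ft[i] - 1)) (i+1) (cnt + 1) k
            (by simp; omega) hd0 (by omega) (by omega)
          rw [hdropset] at hih
          have hw : wrapA ft.length (i+1) = i + 1 := by simp [wrapA]; omega
          rw [hw] at hstep
          have hlenset : (ft.set i (ft[i] - 1)).length = ft.length := by simp
          constructor
          · intro hlt
            rw [hact] at hlt ⊢
            simp only [List.length_cons] at hlt
            have hlt' : k - (cnt + 1) < ((actIdx (ft.drop (i+1)) (i+1)).length : Int) := by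
              push_cast at hlt ⊢; omega
            rw [hstep, hih.1 hlt', hlenset]
            have : (k - cnt).toNat = (k - (cnt + 1)).toNat + 1 := by omega
            rw [this, List.getD_cons_succ]
          · intro hle
            rw [hact] at hle ⊢
            simp only [List.length_cons] at hle
            have hle' : ((actIdx (ft.drop (i+1)) (i+1)).length : Int) ≤ k - (cnt + 1) := by
              push_cast at hle ⊢; omega
            rw [hstep, hih.2 hle', decFrom_set_eat ft i hi hv]
            simp only [List.length_cons]
            congr 1
            · omega
            · push_cast; ring

-- fuel beyond e + 1 is irrelevant for specF while the invariant holds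
theorem specF_mono : ∀ (e f : Nat) (ft : List Int), Pinv ft (e : Int) → e + 1 ≤ f →
    specF f ft e = specF (e+1) ft e := by
  intro e
  induction e using Nat.strong_induction_on with
  | _ e ih =>
    intro f ft hP hf
    obtain ⟨f', rfl⟩ : ∃ f', f = f' + 1 := ⟨f - 1, by omega⟩
    by_cases h : e < (actIdx ft 0).length
    · simp [specF, h]
    · have hm : 1 ≤ (actIdx ft 0).length :=
        List.length_pos_of_ne_nil (Pinv_act_ne_nil ft e hP (by positivity))
      simp only [specF, if_neg h]
      have hP' : Pinv (decRound ft) ((e - (actIdx ft 0).length : Nat) : Int) := by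
        have := Pinv_step ft e hP
        have hc : ((e - (actIdx ft 0).length : Nat) : Int)
            = (e : Int) - (actIdx ft 0).length := by omega
        rwa [hc]
      rw [ih (e - (actIdx ft 0).length) (by omega) f' (decRound ft) hP' (by omega),
          ih (e - (actIdx ft 0).length) (by omega) e (decRound ft) hP' (by omega)]

-- A's loop (with its final renumbering) computes specF
theorem mainA : ∀ (e : Nat) (f : Nat) (ft : List Int) (cnt k : Int),
    ft ≠ [] → cnt ≤ k → k - cnt = (e : Int) → Pinv ft (e : Int) →
    (e + 2) * (ft.length + 1) ≤ f →
    (if solLoop f ft 0 cnt k = 0 then ((ft.length : Nat) : Int)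
     else ((solLoop f ft 0 cnt k : Nat) : Int)) = specF (e+1) ft e := by
  intro e
  induction e using Nat.strong_induction_on with
  | _ e ih =>
    intro f ft cnt k hne hcnt heq hP hf
    have hn : 0 < ft.length := List.length_pos_of_ne_nil hne
    have hfn : ft.length + 1 ≤ f := by
      calc ft.length + 1 ≤ (e + 2) * (ft.length + 1) := Nat.le_mul_of_pos_left _ (by omega)
        _ ≤ f := hf
    have hseg := seg ft.length f ft 0 cnt k (by omega) hn hcnt hfn
    rw [List.drop_zero] at hseg
    by_cases hlt : k - cnt < ((actIdx ft 0).length : Int)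
    · -- the answer falls in this round
      have helt : e < (actIdx ft 0).length := by omega
      have hj : (actIdx ft 0).getD (k - cnt).toNat 0 ∈ actIdx ft 0 := by
        rw [show (k - cnt).toNat = e by omega, List.getD_eq_getElem _ _ helt]
        exact List.getElem_mem _
      have hjlt : (actIdx ft 0).getD (k - cnt).toNat 0 < ft.length := by
        have := (actIdx_bounds ft 0 _ hj).2
        omega
      rw [hseg.1 hlt]
      simp only [specF, if_pos helt]
      rw [show (k - cnt).toNat = e by omega] at hjlt ⊢
      by_cases hwrap : (actIdx ft 0).getD e 0 + 1 = ft.length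
      · rw [show wrapA ft.length ((actIdx ft 0).getD e 0 + 1) = 0 by
            unfold wrapA; rw [if_pos hwrap]]
        simp only [if_true]
        rw [← hwrap]
        push_cast
        ring
      · rw [show wrapA ft.length ((actIdx ft 0).getD e 0 + 1)
            = (actIdx ft 0).getD e 0 + 1 by unfold wrapA; rw [if_neg hwrap]]
        rw [if_neg (by omega)]
        push_cast
        ring
    · -- consume one whole round and recurse
      have hge : ((actIdx ft 0).length : Int) ≤ k - cnt := by omega
      have hm : 1 ≤ (actIdx ft 0).length :=
        List.length_pos_of_ne_nil (Pinv_act_ne_nil ft e hP (by positivity))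
      have hme : (actIdx ft 0).length ≤ e := by omega
      rw [hseg.2 hge, decFrom_zero]
      set m := (actIdx ft 0).length with hmdef
      have hP' : Pinv (decRound ft) ((e - m : Nat) : Int) := by
        have := Pinv_step ft e hP
        have hc : ((e - m : Nat) : Int) = (e : Int) - m := by omega
        rwa [hc]
      have hfuel : (e - m + 2) * ((decRound ft).length + 1) ≤ f - ft.length := by
        rw [decRound_length]
        have h1 : (e - m + 2) * (ft.length + 1) ≤ (e + 1) * (ft.length + 1) :=
          Nat.mul_le_mul_right _ (by omega)
        have h2 : (e + 1) * (ft.length + 1) + (ft.length + 1) = (e + 2) * (ft.length + 1) := by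
          ring
        omega
      have hrec := ih (e - m) (by omega) (f - ft.length) (decRound ft) (cnt + m) k
        (by rw [← List.length_pos_iff, decRound_length]; omega)
        (by omega) (by omega) hP' hfuel
      rw [decRound_length] at hrec
      have hspec : specF (e+1) ft e = specF e (decRound ft) (e - m) := by
        simp only [specF]
        rw [if_neg (show ¬ e < m by omega)]
      rw [hrec, hspec]
      exact (specF_mono (e - m) e (decRound ft) hP' (by omega)).symm

-- B's loop computes specF
theorem mainB : ∀ (f : Nat) (ft : List Int) (k : Int), 0 ≤ k →
    solAltLoop f ft k = specF f ft k.toNat := by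
  intro f
  induction f with
  | zero => intro ft k hk; rfl
  | succ f ih =>
    intro ft k hk
    by_cases h : k < ((actIdx ft 0).length : Int)
    · have hlt : k.toNat < (actIdx ft 0).length := by omega
      have hget : PySem.List.pyGet? (actIdx ft 0) k = some (actIdx ft 0)[k.toNat] := by
        rw [PySem.List.pyGet?_of_nonneg (actIdx ft 0) hk]
        exact List.getElem?_eq_getElem hlt
      simp [solAltLoop, specF, h, hlt, hget]
    · have hlt : ¬ k.toNat < (actIdx ft 0).length := by omega
      simp only [solAltLoop, specF, if_neg h, if_neg hlt]
      rw [ih (decRound ft) (k - (actIdx ft 0).length) (by omega)]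
      congr 1
      omega

theorem solution_spec : Claim_equal_solution := by
  intro ft k _ hPre
  obtain ⟨hne, hk, hdisj⟩ := hPre
  show solution ft k = solution_alt ft k
  have hPinv : Pinv ft ((k.toNat : Nat) : Int) := by
    rw [show ((k.toNat : Nat) : Int) = k by omega]
    by_cases hneg : ∃ x ∈ ft, x < 0
    · exact Or.inl hneg
    · refine Or.inr ⟨fun x hx => ?_, ?_⟩
      · by_contra hlt
        exact hneg ⟨x, hx, by omega⟩
      · rcases hdisj with h | h
        · exact absurd h hneg
        · exact h
  have hA := mainA k.toNat ((k.toNat + 2) * (ft.length + 1)) ft 0 k hne hk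
    (by omega) hPinv le_rfl
  have hB := mainB (k.toNat + 1) ft k hk
  unfold solution solution_alt
  rw [hB]
  exact hA
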